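-- pv_equiv track=rewrite | github.com/need-singularity/n6-architecture | docs/warp-drive/verify_warp_n6.py | jordan_2
-- ===== SOURCE A (Python) =====
-- def jordan_2(n: int) -> int:
--     """Jordan totient J_2(n) = n^2 * prod(1 - 1/p^2)."""
--     x, result, p = n, n * n, 2
--     primes = set()
--     while p * p <= x:
--         if x % p == 0:
--             primes.add(p)
--             while x % p == 0:
--                 x //= p
--         p += 1
--     if x > 1:
--         primes.add(x)
--     for pp in primes:
--         result = result * (pp * pp - 1) // (pp * pp)
--     return result
-- ===== SOURCE B (Python) =====
-- def jordan_2(n: int) -> int: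
--     """Jordan totient J_2(n), division-free: peel the smallest factor off n
--     one prime at a time and build the product p^(2k-2)*(p^2-1) up from 1."""
--     if n < 2:
--         return n * n
--     result, m, p = 1, n, 2
--     while m > 1:
--         # advance p to the smallest factor of m (resuming where we left off)
--         while p * p <= m and m % p != 0:
--             p += 1
--         if p * p > m:
--             p = m
--         m //= p
--         result *= p * p if m % p == 0 else p * p - 1
--     return result
-- ===== Notes on version B (the rewrite author's own statement) =====
-- stated objective: alternative
-- what changed: Instead of A's two phases (strip every prime power while collecting the distinct primes into a set, then repeatedly floor-divide n^2 by p^2 per prime), B peels the smallest factor off n one prime at a time and builds the result as an exact division-free product starting from 1, multiplying p*p while the prime still divides and p*p-1 on its last occurrence.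
import Mathlib
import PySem

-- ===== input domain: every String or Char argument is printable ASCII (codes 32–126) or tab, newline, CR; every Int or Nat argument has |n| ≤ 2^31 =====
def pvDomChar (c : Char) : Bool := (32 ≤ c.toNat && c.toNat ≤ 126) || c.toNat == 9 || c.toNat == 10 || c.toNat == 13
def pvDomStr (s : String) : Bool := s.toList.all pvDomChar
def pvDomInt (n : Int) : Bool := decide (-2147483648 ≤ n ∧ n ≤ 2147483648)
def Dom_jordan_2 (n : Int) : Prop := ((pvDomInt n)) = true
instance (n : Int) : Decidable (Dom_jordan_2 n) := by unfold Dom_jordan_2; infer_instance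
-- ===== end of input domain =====

-- B replaces A's two phases (collect the distinct primes into a set while stripping, then
-- floor-divide n^2 by p^2 per prime) with a division-free single loop that peels the
-- smallest factor off n one prime at a time, building the product up from 1 (objective: alternative).

-- ===== PORT A =====
-- inner 'while x % p == 0: x //= p'; fuel only makes the recursion structural (always sufficient where A runs it)
def stripA (fuel : Nat) (x p : Int) : Int :=
  match fuel with
  | 0 => x
  | f + 1 => if PySem.Int.mod x p = 0 then stripA f (PySem.Int.floordiv x p) p else x

-- 'while p * p <= x: …' of A, collecting the primes into the set
def loopA (fuel : Nat) (x p : Int) (primes : PySem.Set Int) : Int × PySem.Set Int :=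
  match fuel with
  | 0 => (x, primes)
  | f + 1 =>
    if p * p ≤ x then
      if PySem.Int.mod x p = 0 then
        loopA f (stripA (x.toNat + 1) x p) (p + 1) (PySem.Set.add primes p)
      else loopA f x (p + 1) primes
    else (x, primes)

def jordan_2 (n : Int) : Int :=
  let r := loopA (n.toNat + 2) n 2 ([] : PySem.Set Int)
  let primes := if 1 < r.1 then PySem.Set.add r.2 r.1 else r.2
  primes.foldl (fun result pp => PySem.Int.floordiv (result * (pp * pp - 1)) (pp * pp)) (n * n)

-- ===== PORT B =====
-- inner 'while p * p <= m and m % p != 0: p += 1' (fuel always sufficient where B runs it)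
def findB (fuel : Nat) (m p : Int) : Int :=
  match fuel with
  | 0 => p
  | f + 1 => if p * p ≤ m ∧ ¬ PySem.Int.mod m p = 0 then findB f m (p + 1) else p

-- B's outer 'while m > 1' loop
def outerB (fuel : Nat) (m result p : Int) : Int :=
  match fuel with
  | 0 => result
  | f + 1 =>
    if 1 < m then
      let q' := if findB (m.toNat + 2) m p * findB (m.toNat + 2) m p > m then m else findB (m.toNat + 2) m p
      outerB f (PySem.Int.floordiv m q')
        (result * (if PySem.Int.mod (PySem.Int.floordiv m q') q' = 0 then q' * q' else q' * q' - 1))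
        q'
    else result

def jordan_2_alt (n : Int) : Int :=
  if n < 2 then n * n else outerB (n.toNat + 2) n 1 2

-- ===== PRECONDITION & SPEC =====
def Spec_jordan_2 (n : Int) (out : Int) : Prop := out = jordan_2_alt n
instance (n : Int) (out : Int) : Decidable (Spec_jordan_2 n out) := by unfold Spec_jordan_2; infer_instance

-- ===== CLAIM (what is proved, stated in full; the proofs are below) =====
def Claim_equal_jordan_2 : Prop := ∀ (n : Int), Dom_jordan_2 n → Spec_jordan_2 n (jordan_2 n)

-- ===== LEMMAS AND PROOFS =====

-- arithmetic facts the mirrors' termination proofs cite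
theorem pv_fd_nonneg (x p : Int) (hx : 0 ≤ x) (hp : 2 ≤ p) : 0 ≤ PySem.Int.floordiv x p := by
  rw [PySem.Int.floordiv_eq_ediv_of_pos (by omega : (0:Int) < p)]
  exact Int.ediv_nonneg hx (by omega)

theorem pv_fd_lt (x p : Int) (hx : 0 < x) (hp : 2 ≤ p) : PySem.Int.floordiv x p < x := by
  rw [PySem.Int.floordiv_eq_ediv_of_pos (by omega : (0:Int) < p)]
  have h1 := Int.mul_ediv_add_emod x p
  have h2 := Int.emod_nonneg x (by omega : p ≠ 0)
  have h3 : 0 ≤ x / p := Int.ediv_nonneg (by omega) (by omega)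
  nlinarith [mul_nonneg h3 (show (0:Int) ≤ p - 2 by omega)]

-- exact-division facts
theorem fd_mul_cancel (k q : Int) (hq : 0 < q) : PySem.Int.floordiv (q * k) q = k := by
  rw [PySem.Int.floordiv_eq_ediv_of_pos hq, Int.mul_ediv_cancel_left _ (by omega)]

theorem pv_term_strip (x p : Int) (h : 2 ≤ p ∧ 0 < x ∧ PySem.Int.mod x p = 0) :
    (PySem.Int.floordiv x p).toNat < x.toNat := by
  have h1 := pv_fd_lt x p h.2.1 h.1
  have h2 := pv_fd_nonneg x p (by omega) h.1
  omega

theorem pv_term_scan (x p : Int) (h2 : 2 ≤ p) (hle : p * p ≤ x) :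
    (x - (p + 1)).toNat < (x - p).toNat := by
  have h1 : p < x := by nlinarith
  omega

-- ===== proof-side well-founded mirrors of the loops =====
-- inner 'while x % p == 0: x //= p'; the '2 ≤ p ∧ 0 < x' conjuncts only make the
-- recursion total (they always hold where A runs this loop: p ≥ 2 and x ≥ p*p > 0)
def stripW (x p : Int) : Int :=
  if h : 2 ≤ p ∧ 0 < x ∧ PySem.Int.mod x p = 0 then stripW (PySem.Int.floordiv x p) p else x
termination_by x.toNat
decreasing_by exact pv_term_strip x p h

-- needed by loopW's termination proof
theorem stripW_le (x p : Int) : stripW x p ≤ x := by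
  fun_induction stripW x p with
  | case1 x h ih => have := pv_fd_lt x p h.2.1 h.1; omega
  | case2 x h => exact le_refl x

theorem pv_term_loop (x p : Int) (h2 : 2 ≤ p) (hle : p * p ≤ x) :
    (stripW x p - (p + 1)).toNat < (x - p).toNat := by
  have h1 : p < x := by nlinarith
  have := stripW_le x p
  omega

-- 'while p * p <= x: …' of A, collecting the primes into the set
def loopW (x p : Int) (primes : PySem.Set Int) : Int × PySem.Set Int :=
  if h : 2 ≤ p ∧ p * p ≤ x then
    if PySem.Int.mod x p = 0 then
      loopW (stripW x p) (p + 1) (PySem.Set.add primes p)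
    else loopW x (p + 1) primes
  else (x, primes)
termination_by (x - p).toNat
decreasing_by
  · exact pv_term_loop x p h.1 h.2
  · exact pv_term_scan x p h.1 h.2

-- ===== (B-side machinery) =====
-- inner 'while p * p <= m and m % p != 0: p += 1'; the '2 ≤ p' conjunct only makes the
-- recursion total (p ≥ 2 wherever B runs this scan)
def findW (m p : Int) : Int :=
  if h : 2 ≤ p ∧ p * p ≤ m ∧ ¬ PySem.Int.mod m p = 0 then findW m (p + 1) else p
termination_by (m - p).toNat
decreasing_by exact pv_term_scan m p h.1 h.2.1

-- needed by outerW's termination proof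
theorem findW_ge (m p : Int) : p ≤ findW m p := by
  fun_induction findW m p with
  | case1 p h ih => omega
  | case2 p h => exact le_refl p

theorem pv_term_outer (m p : Int) (h : 2 ≤ p ∧ 1 < m) :
    (PySem.Int.floordiv m (if findW m p * findW m p > m then m else findW m p)).toNat < m.toNat := by
  have hge := findW_ge m p
  split
  · have h1 := pv_fd_lt m m (by omega) (by omega)
    have h2 := pv_fd_nonneg m m (by omega) (by omega)
    omega
  · have h1 := pv_fd_lt m (findW m p) (by omega) (by omega)
    have h2 := pv_fd_nonneg m (findW m p) (by omega) (by omega)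
    omega

-- B's outer 'while m > 1' loop; the '2 ≤ p' conjunct only makes the recursion total
def outerW (m result p : Int) : Int :=
  if h : 2 ≤ p ∧ 1 < m then
    let q' := if findW m p * findW m p > m then m else findW m p
    outerW (PySem.Int.floordiv m q')
      (result * (if PySem.Int.mod (PySem.Int.floordiv m q') q' = 0 then q' * q' else q' * q' - 1))
      q'
  else result
termination_by m.toNat
decreasing_by exact pv_term_outer m p h



-- the step A applies to the running result for each prime
def jstep (r pp : Int) : Int := PySem.Int.floordiv (r * (pp * pp - 1)) (pp * pp)

theorem jstep_eta :
    (fun result pp => PySem.Int.floordiv (result * (pp * pp - 1)) (pp * pp)) = jstep := rfl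

-- bridge loop (proof-only): A's loop fused with the product pass, applying jstep on discovery
def loopC (x r p : Int) : Int × Int :=
  if h : 2 ≤ p ∧ p * p ≤ x then
    if PySem.Int.mod x p = 0 then
      loopC (stripW x p) (jstep r p) (p + 1)
    else loopC x r (p + 1)
  else (x, r)
termination_by (x - p).toNat
decreasing_by
  · exact pv_term_loop x p h.1 h.2
  · exact pv_term_scan x p h.1 h.2

-- the post-processed value of the bridge loop ("A's answer")
def Apost (m R p : Int) : Int :=
  let r := loopC m R p
  if 1 < r.1 then jstep r.2 r.1 else r.2

theorem stripA_dvd (x p : Int) : stripW x p ∣ x := by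
  fun_induction stripW x p with
  | case1 x h ih =>
    obtain ⟨k, hk⟩ := (PySem.Int.mod_eq_zero_iff_dvd x p).mp h.2.2
    have hfd : PySem.Int.floordiv x p = k := by
      rw [hk, PySem.Int.floordiv_eq_ediv_of_pos (by omega : (0:Int) < p),
        Int.mul_ediv_cancel_left _ (by omega : p ≠ 0)]
    rw [hfd] at ih ⊢
    have hkx : k ∣ x := ⟨p, by rw [hk]; ring⟩
    exact dvd_trans ih hkx
  | case2 x h => exact dvd_refl x

theorem stripA_not_dvd (x p : Int) (hp : 2 ≤ p) (hx : 0 < x) : ¬ p ∣ stripW x p := by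
  revert hx
  fun_induction stripW x p with
  | case1 x h ih =>
    intro _
    apply ih
    obtain ⟨k, hk⟩ := (PySem.Int.mod_eq_zero_iff_dvd x p).mp h.2.2
    rw [hk, PySem.Int.floordiv_eq_ediv_of_pos (by omega : (0:Int) < p),
      Int.mul_ediv_cancel_left _ (by omega : p ≠ 0)]
    have hk0 : 0 < p * k := hk ▸ h.2.1
    nlinarith [hk0, h.1]
  | case2 x h =>
    intro hx
    intro hdvd
    have hm : PySem.Int.mod x p ≠ 0 := by simpa [hp, hx] using h
    exact hm ((PySem.Int.mod_eq_zero_iff_dvd x p).mpr hdvd)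

theorem set_add_not_mem (s : PySem.Set Int) (x : Int) (h : x ∉ s) :
    PySem.Set.add s x = s ++ [x] := by
  simp [PySem.Set.add, PySem.Set.contains, h]

-- core relation: A's loop returns exactly the primes it appended, the bridge loop folds jstep
-- over that suffix; no collected prime divides the final x
theorem loop_rel (x r p : Int) : ∀ s : PySem.Set Int, 2 ≤ p →
    (∀ q ∈ s, q < p ∧ ¬ q ∣ x) →
    ∃ t : List Int,
      loopW x p s = ((loopC x r p).1, s ++ t) ∧
      (loopC x r p).2 = t.foldl jstep r ∧
      (∀ q ∈ s ++ t, ¬ q ∣ (loopC x r p).1) := by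
  fun_induction loopC x r p with
  | case1 x r p h hmod ih =>
    intro s hp hs
    have hx : 0 < x := by nlinarith [h.1, h.2]
    have hnm : p ∉ s := fun hm => absurd (hs p hm).1 (lt_irrefl p)
    have hadd := set_add_not_mem s p hnm
    have hs' : ∀ q ∈ (PySem.Set.add s p : List Int), q < p + 1 ∧ ¬ q ∣ stripW x p := by
      rw [hadd]
      intro q hq
      rcases List.mem_append.mp hq with hq | hq
      · exact ⟨by have := (hs q hq).1; omega,
          fun hd => (hs q hq).2 (dvd_trans hd (stripA_dvd x p))⟩
      · simp only [List.mem_singleton] at hq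
        exact ⟨by omega, by rw [hq]; exact stripA_not_dvd x p h.1 hx⟩
    obtain ⟨t, h1, h2, h3⟩ := ih (PySem.Set.add s p) (by omega) hs'
    refine ⟨p :: t, ?_, ?_, ?_⟩
    · rw [loopW.eq_def, dif_pos h, if_pos hmod, h1, hadd]
      simp
    · rw [h2]
      simp
    · intro q hq
      apply h3
      rw [hadd]
      simp only [List.append_assoc, List.singleton_append]
      exact hq
  | case2 x r p h hmod ih =>
    intro s hp hs
    obtain ⟨t, h1, h2, h3⟩ := ih s (by omega)
      (fun q hq => ⟨by have := (hs q hq).1; omega, (hs q hq).2⟩)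
    exact ⟨t, by rw [loopW.eq_def, dif_pos h, if_neg hmod]; exact h1, h2, h3⟩
  | case3 x r p h =>
    intro s hp hs
    refine ⟨[], ?_, ?_, ?_⟩
    · rw [loopW.eq_def, dif_neg h]; simp
    · simp
    · intro q hq
      exact (hs q (by simpa using hq)).2

-- fuel adequacy: each fuelled port loop equals its well-founded mirror wherever the loop runs
theorem strip_fuel : ∀ (f : Nat) (x p : Int), 2 ≤ p → 0 < x → x.toNat < f →
    stripA f x p = stripW x p := by
  intro f
  induction f with
  | zero => intro x p _ _ hf; omega
  | succ f ih =>
    intro x p hp hx hf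
    by_cases hm : PySem.Int.mod x p = 0
    · obtain ⟨k, hk⟩ := (PySem.Int.mod_eq_zero_iff_dvd x p).mp hm
      have hfd : PySem.Int.floordiv x p = k := by
        rw [hk]; exact fd_mul_cancel k p (by omega)
      have hk0 : 0 < k := by nlinarith
      have hklt : k < x := by nlinarith
      rw [stripA, if_pos hm, stripW.eq_def, dif_pos ⟨hp, hx, hm⟩, hfd]
      exact ih k p hp hk0 (by omega)
    · rw [stripA, if_neg hm, stripW.eq_def, dif_neg (fun hc => hm hc.2.2)]

theorem loop_fuel : ∀ (f : Nat) (x p : Int) (s : PySem.Set Int), 2 ≤ p → (x - p).toNat < f →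
    loopA f x p s = loopW x p s := by
  intro f
  induction f with
  | zero => intro x p s _ hf; omega
  | succ f ih =>
    intro x p s hp hf
    by_cases hpx : p * p ≤ x
    · have hx : 0 < x := by nlinarith
      have hplt : p < x := by nlinarith
      by_cases hm : PySem.Int.mod x p = 0
      · rw [loopA, if_pos hpx, if_pos hm,
          strip_fuel (x.toNat + 1) x p hp hx (by omega),
          loopW.eq_def, dif_pos ⟨hp, hpx⟩, if_pos hm]
        have hle := stripW_le x p
        exact ih (stripW x p) (p + 1) _ (by omega) (by omega)
      · rw [loopA, if_pos hpx, if_neg hm, loopW.eq_def, dif_pos ⟨hp, hpx⟩, if_neg hm]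
        exact ih x (p + 1) s (by omega) (by omega)
    · rw [loopA, if_neg hpx, loopW.eq_def, dif_neg (fun hc => hpx hc.2)]

theorem find_fuel : ∀ (f : Nat) (m p : Int), 2 ≤ p → (m - p).toNat < f →
    findB f m p = findW m p := by
  intro f
  induction f with
  | zero => intro m p _ hf; omega
  | succ f ih =>
    intro m p hp hf
    by_cases hc : p * p ≤ m ∧ ¬ PySem.Int.mod m p = 0
    · have hplt : p < m := by nlinarith [hc.1]
      rw [findB, if_pos hc, findW.eq_def, dif_pos ⟨hp, hc.1, hc.2⟩]
      exact ih m (p + 1) (by omega) (by omega)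
    · rw [findB, if_neg hc, findW.eq_def, dif_neg (fun hd => hc ⟨hd.2.1, hd.2.2⟩)]

theorem outer_fuel : ∀ (f : Nat) (m res p : Int), 2 ≤ p → m.toNat < f →
    outerB f m res p = outerW m res p := by
  intro f
  induction f with
  | zero => intro m res p _ hf; omega
  | succ f ih =>
    intro m res p hp hf
    by_cases hm : 1 < m
    · have hfind : findB (m.toNat + 2) m p = findW m p :=
        find_fuel (m.toNat + 2) m p hp (by omega)
      have hq2 : 2 ≤ (if findW m p * findW m p > m then m else findW m p) := by
        have := findW_ge m p
        split
        · omega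
        · omega
      have hlt := pv_fd_lt m _ (by omega : (0:Int) < m) hq2
      have hge := pv_fd_nonneg m _ (by omega : (0:Int) ≤ m) hq2
      rw [outerB, if_pos hm, hfind, outerW.eq_def, dif_pos ⟨hp, hm⟩]
      exact ih _ _ _ hq2 (by omega)
    · rw [outerB, if_neg hm, outerW.eq_def, dif_neg (fun hc => hm hc.2)]



-- A's port computes Apost
theorem jordanA_eq (n : Int) : jordan_2 n = Apost n (n * n) 2 := by
  obtain ⟨t, h1, h2, h3⟩ := loop_rel n (n * n) 2 ([] : PySem.Set Int) (by omega) (by simp)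
  simp only [List.nil_append] at h1 h2 h3
  have hf : loopA (n.toNat + 2) n 2 ([] : PySem.Set Int) = loopW n 2 [] :=
    loop_fuel _ n 2 [] (le_refl 2) (by omega)
  simp only [jordan_2, hf, Apost, h1, jstep_eta]
  by_cases hx : 1 < (loopC n (n * n) 2).1
  · rw [if_pos hx, if_pos hx]
    have hnm : (loopC n (n * n) 2).1 ∉ t := fun hm => h3 _ hm (dvd_refl _)
    rw [set_add_not_mem t _ hnm, List.foldl_append, ← h2]
    simp
  · rw [if_neg hx, if_neg hx, ← h2]

theorem jstep_exact (k q : Int) (hq : 2 ≤ q) : jstep (q * q * k) q = k * (q * q - 1) := by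
  unfold jstep
  have h : q * q * k * (q * q - 1) = (q * q) * (k * (q * q - 1)) := by ring
  rw [h, fd_mul_cancel _ _ (by nlinarith)]

theorem mod_one_ne (q : Int) (hq : 2 ≤ q) : ¬ PySem.Int.mod 1 q = 0 := by
  intro h
  have := (PySem.Int.mod_eq_zero_iff_dvd 1 q).mp h
  have := Int.le_of_dvd (by omega) this
  omega

-- findW facts
theorem findB_no_factor (m p : Int) : ∀ r, p ≤ r → r < findW m p → ¬ r ∣ m := by
  fun_induction findW m p with
  | case1 p h ih =>
    intro r h1 h2
    rcases eq_or_lt_of_le h1 with he | hlt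
    · exact fun hd => h.2.2 ((PySem.Int.mod_eq_zero_iff_dvd m p).mpr (by rw [he]; exact hd))
    · exact ih r (by omega) h2
  | case2 p h =>
    intro r h1 h2
    omega

theorem findB_stop (m p : Int) : 2 ≤ p → findW m p * findW m p ≤ m → PySem.Int.mod m (findW m p) = 0 := by
  fun_induction findW m p with
  | case1 p h ih => intro _ hle; exact ih (by omega) hle
  | case2 p h =>
    intro hp hle
    by_contra hmod
    exact h ⟨hp, hle, hmod⟩

-- bridge loop scans non-divisors exactly like findW
theorem loopC_scan (m p : Int) : ∀ R, loopC m R p = loopC m R (findW m p) := by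
  fun_induction findW m p with
  | case1 p h ih =>
    intro R
    rw [loopC.eq_def, dif_pos ⟨h.1, h.2.1⟩, if_neg h.2.2]
    exact ih R
  | case2 p h => intro R; rfl

-- main bridge: the fused strip-at-once loop equals B's peel-one-at-a-time loop
theorem main_bridge (m res p : Int) :
    2 ≤ p → 1 < m → (∀ r, 2 ≤ r → r < p → ¬ r ∣ m) →
    Apost m (m * m * res) p = outerW m res p := by
  fun_induction outerW m res p with
  | case1 m res p h q' ih =>
    intro hp hm hnf
    have hq2 : 2 ≤ findW m p := le_trans hp (findW_ge m p)
    have hq_nf : ∀ r, 2 ≤ r → r < findW m p → ¬ r ∣ m := by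
      intro r h1 h2
      rcases lt_or_ge r p with hr | hr
      · exact hnf r h1 hr
      · exact findB_no_factor m p r hr h2
    by_cases hbig : findW m p * findW m p > m
    · -- the scan passed sqrt(m): m itself is the remaining (prime) factor
      have hq'm : q' = m := by
        have hd : q' = (if findW m p * findW m p > m then m else findW m p) := rfl
        rw [hd]; simp [hbig]
      rw [hq'm] at ih ⊢
      have hm1 : PySem.Int.floordiv m m = 1 := by
        have := fd_mul_cancel 1 m (by omega)
        simpa using this
      rw [hm1, if_neg (mod_one_ne m (by omega)),
        outerW.eq_def, dif_neg (by omega : ¬((2:Int) ≤ m ∧ (1:Int) < 1))]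
      simp only [Apost]
      rw [loopC_scan m p (m * m * res), loopC.eq_def,
        dif_neg (fun hc => absurd hc.2 (not_le.mpr hbig))]
      simp only [if_pos hm]
      exact jstep_exact res m (by omega)
    · -- found a factor q = findW m p with q*q ≤ m
      push_neg at hbig
      have hq'q : q' = findW m p := by
        have hd : q' = (if findW m p * findW m p > m then m else findW m p) := rfl
        rw [hd]; simp [not_lt.mpr hbig]
      rw [hq'q] at ih ⊢
      set q := findW m p with hqdef
      have hmod : PySem.Int.mod m q = 0 := findB_stop m p (by omega) hbig
      have hdvd : q ∣ m := (PySem.Int.mod_eq_zero_iff_dvd m q).mp hmod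
      obtain ⟨m', hmm'⟩ := hdvd
      have hfd : PySem.Int.floordiv m q = m' := by rw [hmm']; exact fd_mul_cancel m' q (by omega)
      rw [hfd] at ih ⊢
      have hm'2 : 2 ≤ m' := by nlinarith
      have hm'dvd : m' ∣ m := ⟨q, by rw [hmm']; ring⟩
      have hnf' : ∀ r, 2 ≤ r → r < q → ¬ r ∣ m' := fun r h1 h2 hd =>
        hq_nf r h1 h2 (hd.trans hm'dvd)
      by_cases hdm : PySem.Int.mod m' q = 0
      · -- q still divides m': B multiplies by q*q
        simp only [if_pos hdm, dif_pos hdm] at ih ⊢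
        rw [← ih hq2 (by omega) hnf']
        have hR : m' * m' * (res * (q * q)) = m * m * res := by rw [hmm']; ring
        rw [hR]
        have hqm' : q ∣ m' := (PySem.Int.mod_eq_zero_iff_dvd m' q).mp hdm
        simp only [Apost]
        rw [loopC_scan m p (m * m * res), ← hqdef]
        by_cases hq2m' : q * q ≤ m'
        · -- both loops take the same strip step
          rw [loopC.eq_def (x := m), dif_pos ⟨by omega, hbig⟩, if_pos hmod]
          rw [loopC.eq_def (x := m'), dif_pos ⟨by omega, hq2m'⟩, if_pos hdm]
          have hstrip : stripW m q = stripW m' q := by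
            rw [stripW.eq_def (x := m), dif_pos ⟨by omega, by omega, hmod⟩, hfd]
          rw [hstrip]
        · -- q ∣ m', m' < q*q, no smaller factor: m' = q
          obtain ⟨s, hs⟩ := hqm'
          have hs1 : s = 1 := by
            by_contra hne
            have hs0 : 0 < s := by nlinarith
            have hslt : s < q := by nlinarith
            exact hq_nf s (by omega) hslt ⟨q * q, by rw [hmm', hs]; ring⟩
          have hm'q : m' = q := by rw [hs, hs1, mul_one]
          have hstrip : stripW m q = 1 := by
            rw [stripW.eq_def (x := m), dif_pos ⟨by omega, by omega, hmod⟩, hfd, hm'q,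
              stripW.eq_def (x := q),
              dif_pos ⟨by omega, by omega, (PySem.Int.mod_eq_zero_iff_dvd q q).mpr dvd_rfl⟩]
            have h1 : PySem.Int.floordiv q q = 1 := by
              have := fd_mul_cancel 1 q (by omega)
              simpa using this
            rw [h1, stripW.eq_def, dif_neg (fun hc => mod_one_ne q (by omega) hc.2.2)]
          rw [loopC.eq_def (x := m), dif_pos ⟨by omega, hbig⟩, if_pos hmod, hstrip]
          rw [loopC.eq_def (x := 1), dif_neg (fun hc => by nlinarith [hc.1, hc.2] : ¬(2 ≤ q + 1 ∧ (q + 1) * (q + 1) ≤ 1))]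
          rw [loopC.eq_def (x := m'), dif_neg (fun hc => hq2m' hc.2)]
          simp only [if_neg (by omega : ¬(1:Int) < 1), hm'q]
          rw [if_pos (by omega : (1:Int) < q)]
      · -- last copy of q: B multiplies by q*q - 1
        simp only [if_neg hdm, dif_neg hdm] at ih ⊢
        rw [← ih hq2 (by omega) hnf']
        simp only [Apost]
        rw [loopC_scan m p (m * m * res), ← hqdef]
        have hstrip : stripW m q = m' := by
          rw [stripW.eq_def (x := m), dif_pos ⟨by omega, by omega, hmod⟩, hfd,
            stripW.eq_def, dif_neg (fun hc => hdm hc.2.2)]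
        have hj : jstep (m * m * res) q = m' * m' * (res * (q * q - 1)) := by
          rw [show m * m * res = q * q * (m' * m' * res) by rw [hmm']; ring,
            jstep_exact _ _ (by omega)]
          ring
        rw [loopC.eq_def (x := m), dif_pos ⟨by omega, hbig⟩, if_pos hmod, hstrip, hj]
        by_cases hq2m' : q * q ≤ m'
        · rw [loopC.eq_def (x := m') (p := q), dif_pos ⟨by omega, hq2m'⟩, if_neg hdm]
        · rw [loopC.eq_def (x := m') (p := q + 1),
            dif_neg (fun hc => by nlinarith [hc.1, hc.2, hq2] : ¬(2 ≤ q + 1 ∧ (q + 1) * (q + 1) ≤ m'))]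
          rw [loopC.eq_def (x := m') (p := q), dif_neg (fun hc => hq2m' hc.2)]
  | case2 m res p h =>
    intro hp hm _
    exact absurd ⟨hp, hm⟩ h

-- ===== VERDICT (by name: the statement is the Claim_ definition above) =====
theorem jordan_2_spec : Claim_equal_jordan_2 := by
  intro n _
  unfold Spec_jordan_2 jordan_2_alt
  by_cases hn : n < 2
  · rw [if_pos hn]
    have hf : loopA (n.toNat + 2) n 2 ([] : PySem.Set Int) = loopW n 2 [] :=
      loop_fuel _ n 2 [] (le_refl 2) (by omega)
    have hA : loopW n 2 ([] : PySem.Set Int) = (n, []) := by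
      rw [loopW.eq_def, dif_neg (by omega : ¬((2:Int) ≤ 2 ∧ 2 * 2 ≤ n))]
    simp [jordan_2, hf, hA, show ¬(1:Int) < n by omega]
  · push_neg at hn
    rw [if_neg (by omega : ¬ n < 2)]
    have h := main_bridge n 1 2 (le_refl 2) (by omega) (fun r h1 h2 => absurd h1 (by omega))
    rw [mul_one] at h
    rw [jordanA_eq, h, outer_fuel (n.toNat + 2) n 1 2 (le_refl 2) (by omega)]
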